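-- pv_equiv track=rewrite | github.com/olyashik/IoT | Python/lora_utils.py | selectbits_encode
-- ===== SOURCE A (Python) =====
-- def selectbits_encode(symbol):
--     """Select specific bits and add zeros (from 8-bit to 4-bit)"""
--     symbol_binary = [(symbol >> i) & 1 for i in range(7, -1, -1)]
--     symbol_binary_rot = [0, symbol_binary[0], symbol_binary[1], symbol_binary[2],
--                          0, symbol_binary[3], 0, 0]
--     symbol_rot = 0
--     for i, bit in enumerate(symbol_binary_rot[::-1]):
--         if bit:
--             symbol_rot |= (1 << i)
--     return symbol_rot
-- ===== SOURCE B (Python) =====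
-- def selectbits_encode(symbol):
--     """Select specific bits and add zeros (from 8-bit to 4-bit)"""
--     return ((((symbol >> 4) & 1) << 2)
--             | (((symbol >> 5) & 1) << 4)
--             | (((symbol >> 6) & 1) << 5)
--             | (((symbol >> 7) & 1) << 6))
-- ===== Notes on version B (the rewrite author's own statement) =====
-- stated objective: simpler
-- what changed: Replaced the bit-list construction, the hand-built rearranged list and the enumerate/reverse OR-accumulation loop by one closed-form bitwise expression that shifts each of the four used input bits (4..7) directly into its output position (2,4,5,6).
import Mathlib
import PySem

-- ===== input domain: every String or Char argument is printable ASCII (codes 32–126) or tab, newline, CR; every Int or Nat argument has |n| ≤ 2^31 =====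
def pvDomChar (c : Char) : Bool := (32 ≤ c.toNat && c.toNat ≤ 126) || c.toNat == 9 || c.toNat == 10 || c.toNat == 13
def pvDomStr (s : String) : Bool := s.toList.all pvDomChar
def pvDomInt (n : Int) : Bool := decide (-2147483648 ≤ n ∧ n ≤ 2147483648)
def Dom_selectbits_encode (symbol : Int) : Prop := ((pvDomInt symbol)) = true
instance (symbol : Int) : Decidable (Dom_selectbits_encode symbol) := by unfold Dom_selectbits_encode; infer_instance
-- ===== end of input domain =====

-- B replaces A's bit lists and OR-accumulation loop by one closed-form shift-and-OR expression (simpler).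
-- ===== PORT A =====
-- i in range(7,-1,-1) is nonneg, so '>>> i.toNat' is exact; list indices 0..3 are always in range (length 8), '.getD 0' is unreachable.
def selectbits_encode (symbol : Int) : Int :=
  let symbol_binary : List Int :=
    (PySem.List.pyRange 7 (-1) (-1)).map (fun i => PySem.Int.band (symbol >>> i.toNat) 1)
  let symbol_binary_rot : List Int :=
    [0, (PySem.List.pyGet? symbol_binary 0).getD 0, (PySem.List.pyGet? symbol_binary 1).getD 0,
     (PySem.List.pyGet? symbol_binary 2).getD 0,
     0, (PySem.List.pyGet? symbol_binary 3).getD 0, 0, 0]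
  (PySem.List.enumerate ((PySem.List.slice? symbol_binary_rot none none (-1)).getD [])).foldl
    (fun (symbol_rot : Int) (p : Int × Int) =>
      if p.2 ≠ 0 then PySem.Int.bor symbol_rot ((1 : Int) <<< p.1.toNat) else symbol_rot) 0

-- ===== PORT B =====
def selectbits_encode_alt (symbol : Int) : Int :=
  PySem.Int.bor (PySem.Int.bor (PySem.Int.bor
    ((PySem.Int.band (symbol >>> 4) 1) <<< 2)
    ((PySem.Int.band (symbol >>> 5) 1) <<< 4))
    ((PySem.Int.band (symbol >>> 6) 1) <<< 5))
    ((PySem.Int.band (symbol >>> 7) 1) <<< 6)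

-- ===== PRECONDITION & SPEC =====
def Spec_selectbits_encode (symbol : Int) (out : Int) : Prop := out = selectbits_encode_alt symbol
instance (symbol : Int) (out : Int) : Decidable (Spec_selectbits_encode symbol out) := by unfold Spec_selectbits_encode; infer_instance

-- ===== CLAIM (what is proved, stated in full; the proofs are below) =====
def Claim_equal_selectbits_encode : Prop := ∀ (symbol : Int), Dom_selectbits_encode symbol → Spec_selectbits_encode symbol (selectbits_encode symbol)

-- ===== LEMMAS AND PROOFS =====
theorem band_one_cases (x : Int) : PySem.Int.band x 1 = 0 ∨ PySem.Int.band x 1 = 1 := by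
  rw [PySem.Int.band_one]
  unfold PySem.Int.mod
  rw [Int.fmod_eq_emod]
  omega

-- ===== VERDICT (by name: the statement is the Claim_ definition above) =====
theorem selectbits_encode_spec : Claim_equal_selectbits_encode := by
  intro symbol _
  unfold Spec_selectbits_encode selectbits_encode selectbits_encode_alt
  simp [PySem.List.pyRange, PySem.List.pyGet?, PySem.List.pyIdx?,
        PySem.List.slice?_none_none_neg_one, PySem.List.enumerate]
  rcases band_one_cases (symbol >>> 4) with h4 | h4 <;>
  rcases band_one_cases (symbol >>> 5) with h5 | h5 <;>
  rcases band_one_cases (symbol >>> 6) with h6 | h6 <;>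
  rcases band_one_cases (symbol >>> 7) with h7 | h7 <;>
    simp [h4, h5, h6, h7] <;> decide
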